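-- pv_equiv track=rewrite | github.com/PastIsJustPast/AlgorithmStudy | 3주차(카카오)/00_신고 결과 받기/신고 결과 받기_김원호.py | solution
-- ===== SOURCE A (Python) =====
-- def solution(id_list, report, k):
--     reporting_id2reported_ids = {}
--     reported_id2reporting_ids = {}
--     id2mail_count = {}
--
--     for id_ in id_list:
--         reporting_id2reported_ids[id_] = set()
--         reported_id2reporting_ids[id_] = set()
--         id2mail_count[id_] = 0
--
--     for ids in report:
--         reporting_id, reported_id = ids.split()
--         reporting_id2reported_ids[reporting_id].add(reported_id)
--         reported_id2reporting_ids[reported_id].add(reporting_id)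
--
--     for reported_id, reporting_ids in reported_id2reporting_ids.items():
--         if len(reporting_ids) >= k:
--             for reporting_id in reporting_ids:
--                 id2mail_count[reporting_id] += 1
--
--     answer = [id2mail_count[id_] for id_ in id_list]
--     return answer
-- ===== SOURCE B (Python) =====
-- def solution(id_list, report, k):
--     pairs = set()
--     for line in report:
--         reporter, reported = line.split()
--         pairs.add((reporter, reported))
--     targets = [t for _, t in pairs]
--     bad = {t for t in targets if targets.count(t) >= k}
--     return [sum(1 for a, b in pairs if a == id_ and b in bad)
--             for id_ in id_list]
-- ===== Notes on version B (the rewrite author's own statement) =====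
-- stated objective: simpler
-- what changed: A builds three id-keyed dicts (including an unused reporter-to-targets map and per-target reporter sets) and accumulates mails into an id-keyed dict; B uses no dicts at all: it dedupes the reports into a pair set, forms the set of targets reported by at least k distinct users, and computes each id's answer directly with a counting comprehension over the pairs.
import Mathlib
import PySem

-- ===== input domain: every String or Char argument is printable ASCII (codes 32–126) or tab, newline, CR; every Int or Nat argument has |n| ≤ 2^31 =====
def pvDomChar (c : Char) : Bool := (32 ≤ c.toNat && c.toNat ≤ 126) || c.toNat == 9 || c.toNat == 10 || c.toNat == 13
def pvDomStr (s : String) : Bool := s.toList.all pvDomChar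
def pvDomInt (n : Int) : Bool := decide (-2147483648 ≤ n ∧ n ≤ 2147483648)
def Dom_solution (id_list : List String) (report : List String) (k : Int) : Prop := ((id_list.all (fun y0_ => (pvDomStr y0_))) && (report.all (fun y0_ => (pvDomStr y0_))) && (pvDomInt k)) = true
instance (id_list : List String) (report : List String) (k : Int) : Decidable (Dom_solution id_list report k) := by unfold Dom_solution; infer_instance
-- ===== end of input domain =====

-- B drops A's three id-keyed dicts entirely: it dedupes the reports into one pair set, forms the
-- set of targets with ≥ k distinct reporters, and counts each id's mails with a direct scan —
-- a simpler dict-free decomposition (not faster), same results.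

-- shared helper: 'x, y = s.split()' (none = ValueError, excluded by Pre_)
def split2? (s : String) : Option (String × String) :=
  match PySem.Str.split₀ s with
  | [a, b] => some (a, b)
  | _ => none

-- ===== PORT A =====
-- Faithful on Pre_ inputs: where Python raises (ValueError on a bad split, KeyError on an
-- id outside id_list) the port skips / lets modify insert — those inputs are outside Pre_.
-- The inner 'for reporting_id in reporting_ids' iterates a Python set; it only increments
-- a dict that is afterwards only looked up, so the (unmodelled) hash order cannot matter.
def solution (id_list : List String) (report : List String) (k : Int) : List Int :=
  let init :=
    id_list.foldl (fun st id_ =>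
      (st.1.insert id_ (PySem.Set.empty : PySem.Set String),
       st.2.1.insert id_ (PySem.Set.empty : PySem.Set String),
       st.2.2.insert id_ (0 : Int)))
      ((PySem.Dict.empty, PySem.Dict.empty, PySem.Dict.empty) :
        PySem.Dict String (PySem.Set String) × PySem.Dict String (PySem.Set String) ×
          PySem.Dict String Int)
  let st2 :=
    report.foldl (fun st ids =>
      match split2? ids with
      | some (rg, rd) =>
          (PySem.Dict.modify st.1 rg [] (fun s => PySem.Set.add s rd),
           PySem.Dict.modify st.2 rd [] (fun s => PySem.Set.add s rg))
      | none => st)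
      (init.1, init.2.1)
  let mail :=
    st2.2.items.foldl (fun m it =>
      if k ≤ (it.2.length : Int) then
        it.2.foldl (fun m r => PySem.Dict.modify m r 0 (· + 1)) m
      else m) init.2.2
  id_list.map (fun id_ => mail.getD id_ 0)

-- ===== PORT B =====
-- 'sum(1 for … if …)' is a countP; 'targets' lists the pair set's second components (consumed
-- only by count / set-building / membership, so the unmodelled set order cannot matter).
def solution_alt (id_list : List String) (report : List String) (k : Int) : List Int :=
  let pairs :=
    report.foldl (fun (p : PySem.Set (String × String)) line =>
      match split2? line with
      | some pr => PySem.Set.add p pr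
      | none => p) PySem.Set.empty
  let targets := pairs.map (·.2)
  let bad : PySem.Set String :=
    targets.foldl (fun s t =>
      if k ≤ (targets.count t : Int) then PySem.Set.add s t else s) PySem.Set.empty
  id_list.map (fun id_ =>
    (pairs.countP (fun pr => pr.1 == id_ && bad.contains pr.2) : Int))

-- ===== PRECONDITION & SPEC =====
-- Pre_ excludes exactly the inputs where A raises: a report line that does not split into
-- exactly two tokens (ValueError) or whose tokens are not both in id_list (KeyError).
def Pre_solution (id_list : List String) (report : List String) (k : Int) : Prop :=
  ∀ line ∈ report,
    (PySem.Str.split₀ line).length = 2 ∧ ∀ t ∈ PySem.Str.split₀ line, t ∈ id_list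
instance (id_list : List String) (report : List String) (k : Int) :
    Decidable (Pre_solution id_list report k) := by unfold Pre_solution; infer_instance
def pvWitness_solution : List String × List String × Int :=
  (["muzi", "frodo", "apeach"], ["muzi frodo", "apeach muzi", "muzi frodo"], 1)

def Spec_solution (id_list : List String) (report : List String) (k : Int) (out : List Int) : Prop := out = solution_alt id_list report k
instance (id_list : List String) (report : List String) (k : Int) (out : List Int) : Decidable (Spec_solution id_list report k out) := by unfold Spec_solution; infer_instance

-- ===== CLAIM (what is proved, stated in full; the proofs are below) =====
def Claim_equal_solution : Prop := ∀ (id_list : List String) (report : List String) (k : Int), Dom_solution id_list report k → Pre_solution id_list report k → Spec_solution id_list report k (solution id_list report k)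

-- ===== LEMMAS AND PROOFS =====

-- a fold of inserts of 0 keeps every getD-at-0 equal to 0
theorem getD_foldl_insert_zero (l : List String) (d : PySem.Dict String Int)
    (h : ∀ x, d.getD x 0 = 0) (x : String) :
    (l.foldl (fun d i => d.insert i (0 : Int)) d).getD x 0 = 0 := by
  induction l generalizing d with
  | nil => exact h x
  | cons a t ih =>
      refine ih _ (fun y => ?_)
      rw [PySem.Dict.getD_insert]; split <;> simp [h]

-- a fold of inserts of the empty set keeps every getD-at-[] equal to []
theorem getD_foldl_insert_empty (l : List String) (d : PySem.Dict String (PySem.Set String))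
    (h : ∀ x, d.getD x [] = []) (x : String) :
    (l.foldl (fun d i => d.insert i (PySem.Set.empty : PySem.Set String)) d).getD x [] = [] := by
  induction l generalizing d with
  | nil => exact h x
  | cons a t ih =>
      refine ih _ (fun y => ?_)
      rw [PySem.Dict.getD_insert]; split <;> simp [h, PySem.Set.empty]

-- A's distribution loop, pointwise
theorem getD_mail_loop (k : Int) (items : List (String × PySem.Set String))
    (m : PySem.Dict String Int) (i : String) :
    (items.foldl (fun m it =>
        if k ≤ (it.2.length : Int) then
          it.2.foldl (fun m r => PySem.Dict.modify m r 0 (· + 1)) m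
        else m) m).getD i 0
      = m.getD i 0 +
        (items.map (fun it => if k ≤ (it.2.length : Int) then (it.2.count i : Int) else 0)).sum := by
  induction items generalizing m with
  | nil => simp
  | cons it t ih =>
      rw [List.foldl_cons, List.map_cons, List.sum_cons]
      by_cases hk : k ≤ (it.2.length : Int)
      · rw [if_pos hk, ih, if_pos hk, PySem.Dict.getD_foldl_modify_add_one]
        ring
      · rw [if_neg hk, ih, if_neg hk]; ring

-- disjoint-or additivity of countP
theorem countP_or_disjoint {α : Type} (l : List α) (p q : α → Bool)
    (h : ∀ a ∈ l, ¬(p a = true ∧ q a = true)) :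
    l.countP (fun a => p a || q a) = l.countP p + l.countP q := by
  induction l with
  | nil => simp
  | cons a t ih =>
      have ht : ∀ b ∈ t, ¬(p b = true ∧ q b = true) := fun b hb => h b (List.mem_cons_of_mem _ hb)
      rw [List.countP_cons, List.countP_cons, List.countP_cons, ih ht]
      have := h a (List.mem_cons_self ..)
      by_cases hp : p a <;> by_cases hq : q a <;> simp_all <;> omega

-- partition of a countP over a duplicate-free key list K
theorem sum_countP_partition (l : List (String × String)) (q : String × String → Bool)
    (K : List String) (hnd : K.Nodup) :
    (K.map (fun x => (l.countP (fun p => p.2 == x && q p) : Int))).sum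
      = (l.countP (fun p => q p && decide (p.2 ∈ K)) : Int) := by
  induction K with
  | nil => simp
  | cons x K' ih =>
      obtain ⟨hx, hnd'⟩ := List.nodup_cons.mp hnd
      rw [List.map_cons, List.sum_cons, ih hnd']
      have : l.countP (fun p => q p && decide (p.2 ∈ x :: K'))
          = l.countP (fun p => p.2 == x && q p) + l.countP (fun p => q p && decide (p.2 ∈ K')) := by
        rw [← countP_or_disjoint l _ _ (by
          intro a _ ⟨h1, h2⟩
          simp only [Bool.and_eq_true, beq_iff_eq, decide_eq_true_eq] at h1 h2
          exact hx (h1.1 ▸ h2.2))]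
        refine List.countP_congr (fun a _ => ?_)
        by_cases h1 : a.2 = x <;> by_cases h2 : a.2 ∈ K' <;> simp [h1, h2] <;> tauto
      rw [this]; push_cast; ring

-- joint invariant: A's per-target reporter sets are the first components of the
-- pairs of B's deduplicated pair set with that target
theorem d2_pairs_inv (rep : List String) (d2 : PySem.Dict String (PySem.Set String))
    (prs : PySem.Set (String × String))
    (h : ∀ x, d2.getD x [] = (prs.filter (fun p => p.2 == x)).map (·.1)) (x : String) :
    ((rep.foldl (fun st ids =>
        match split2? ids with
        | some (rg, rd) => PySem.Dict.modify st rd [] (fun s => PySem.Set.add s rg)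
        | none => st) d2)).getD x []
      = ((rep.foldl (fun p line =>
          match split2? line with
          | some pr => PySem.Set.add p pr
          | none => p) prs).filter (fun p => p.2 == x)).map (·.1) := by
  induction rep generalizing d2 prs with
  | nil => exact h x
  | cons line t ih =>
      rw [List.foldl_cons, List.foldl_cons]
      cases hs : split2? line with
      | none => exact ih _ _ h
      | some pr =>
          obtain ⟨a, b⟩ := pr
          refine ih _ _ (fun y => ?_)
          rw [PySem.Dict.getD_modify, h]
          have hmem : a ∈ (prs.filter (fun p => p.2 == b)).map (·.1) ↔ (a, b) ∈ prs := by
            simp only [List.mem_map, List.mem_filter, beq_iff_eq]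
            constructor
            · rintro ⟨p, ⟨hp, h2⟩, h1⟩
              exact (Prod.ext h1 h2 : p = (a, b)) ▸ hp
            · intro hp; exact ⟨(a, b), ⟨hp, rfl⟩, rfl⟩
          have hred : (match some (a, b) with
              | some pr => PySem.Set.add prs pr
              | none => prs) = PySem.Set.add prs (a, b) := rfl
          rw [hred]
          by_cases hm : (a, b) ∈ prs
          · have hadd : PySem.Set.add prs (a, b) = prs := by simp [PySem.Set.add, hm]
            have hadd2 : PySem.Set.add ((prs.filter (fun p => p.2 == b)).map (·.1)) a
                = (prs.filter (fun p => p.2 == b)).map (·.1) := by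
              simp [PySem.Set.add, hmem.mpr hm]
            rw [hadd]
            by_cases hy : y = b
            · subst hy; rw [if_pos rfl, hadd2]
            · rw [if_neg hy, h]
          · have hadd : PySem.Set.add prs (a, b) = prs ++ [(a, b)] := by
              simp [PySem.Set.add, hm]
            have hadd2 : PySem.Set.add ((prs.filter (fun p => p.2 == b)).map (·.1)) a
                = (prs.filter (fun p => p.2 == b)).map (·.1) ++ [a] := by
              simp only [PySem.Set.add]
              rw [if_neg (by simpa [List.contains_iff_mem] using (fun hc => hm (hmem.mp hc)))]
            rw [hadd, List.filter_append, List.map_append]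
            by_cases hy : y = b
            · subst hy; rw [if_pos rfl, hadd2]
              simp
            · rw [if_neg hy, h]
              have : List.filter (fun p => p.2 == y) [(a, b)] = [] := by
                simp [beq_iff_eq, Ne.symm hy]
              rw [this]; simp

-- keys of A's second loop are unchanged (every target key is already present)
theorem keys_d2_loop (rep : List String) (d2 : PySem.Dict String (PySem.Set String))
    (h : ∀ line ∈ rep, ∀ pr, split2? line = some pr → pr.2 ∈ d2.keys) :
    (rep.foldl (fun st ids =>
        match split2? ids with
        | some (rg, rd) => PySem.Dict.modify st rd [] (fun s => PySem.Set.add s rg)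
        | none => st) d2).keys = d2.keys := by
  induction rep generalizing d2 with
  | nil => rfl
  | cons line t ih =>
      rw [List.foldl_cons]
      cases hs : split2? line with
      | none => exact ih _ (fun l hl => h l (List.mem_cons_of_mem _ hl))
      | some pr =>
          obtain ⟨a, b⟩ := pr
          have hb : b ∈ d2.keys := h line (List.mem_cons_self ..) (a, b) hs
          have hkeys : (PySem.Dict.modify d2 b [] (fun s => PySem.Set.add s a)).keys = d2.keys := by
            rw [PySem.Dict.keys_modify,
              PySem.Dict.keys_insert_of_contains _ _ ((PySem.Dict.contains_iff_mem_keys _ _).mpr hb)]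
          rw [show (match some (a, b) with
              | some (rg, rd) => PySem.Dict.modify d2 rd [] (fun s => PySem.Set.add s rg)
              | none => d2) = PySem.Dict.modify d2 b [] (fun s => PySem.Set.add s a) from rfl]
          rw [ih _ (fun l hl pr hpr => hkeys ▸ h l (List.mem_cons_of_mem _ hl) pr hpr), hkeys]

-- every pair produced by B's first loop comes from the accumulator or from a report line
theorem mem_pairs_loop (rep : List String) (prs : PySem.Set (String × String))
    (p : String × String)
    (hp : p ∈ rep.foldl (fun q line =>
        match split2? line with
        | some pr => PySem.Set.add q pr
        | none => q) prs) :
    p ∈ prs ∨ ∃ line ∈ rep, split2? line = some p := by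
  induction rep generalizing prs with
  | nil => exact Or.inl hp
  | cons line t ih =>
      rw [List.foldl_cons] at hp
      rcases ih _ hp with hmem | ⟨l, hl, hsp⟩
      · cases hs : split2? line with
        | none => rw [hs] at hmem; exact Or.inl hmem
        | some pr =>
            rw [hs] at hmem
            simp only [PySem.Set.add] at hmem
            split at hmem
            · exact Or.inl hmem
            · rcases List.mem_append.mp hmem with h1 | h2
              · exact Or.inl h1
              · have : p = pr := by simpa using h2
                exact Or.inr ⟨line, List.mem_cons_self .., this ▸ hs⟩
      · exact Or.inr ⟨l, List.mem_cons_of_mem _ hl, hsp⟩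

-- split2? inversion
theorem split2?_eq (s : String) (pr : String × String) (h : split2? s = some pr) :
    PySem.Str.split₀ s = [pr.1, pr.2] := by
  unfold split2? at h
  split at h
  · rename_i a b heq
    injection h with h'
    subst h'
    exact heq
  · cases h

-- membership in B's filtered set-comprehension fold
theorem mem_foldl_add_if (p : String → Prop) [DecidablePred p] (l : List String)
    (s0 : PySem.Set String) (x : String) :
    (x ∈ l.foldl (fun s t => if p t then PySem.Set.add s t else s) s0)
      ↔ x ∈ s0 ∨ (x ∈ l ∧ p x) := by
  induction l generalizing s0 with
  | nil => simp
  | cons a t ih =>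
      rw [List.foldl_cons]
      by_cases hp : p a
      · rw [if_pos hp, ih, PySem.Set.mem_add]
        constructor
        · rintro ((h | rfl) | ⟨h1, h2⟩)
          · exact Or.inl h
          · exact Or.inr ⟨List.mem_cons_self .., hp⟩
          · exact Or.inr ⟨List.mem_cons_of_mem _ h1, h2⟩
        · rintro (h | ⟨h1, h2⟩)
          · exact Or.inl (Or.inl h)
          · rcases List.mem_cons.mp h1 with rfl | h1
            · exact Or.inl (Or.inr rfl)
            · exact Or.inr ⟨h1, h2⟩
      · rw [if_neg hp, ih]
        constructor
        · rintro (h | ⟨h1, h2⟩)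
          · exact Or.inl h
          · exact Or.inr ⟨List.mem_cons_of_mem _ h1, h2⟩
        · rintro (h | ⟨h1, h2⟩)
          · exact Or.inl h
          · rcases List.mem_cons.mp h1 with rfl | h1
            · exact absurd h2 hp
            · exact Or.inr ⟨h1, h2⟩

-- 'if the target has ≥ k distinct reporters, count i among them' as one countP over the pairs
theorem if_count_eq (prs : List (String × String)) (k : Int) (i x : String) :
    (if k ≤ (prs.countP (fun r => r.2 == x) : Int)
       then (prs.countP (fun p => p.1 == i && p.2 == x) : Int) else 0)
      = (prs.countP (fun p => p.2 == x &&
          (decide (k ≤ (prs.countP (fun r => r.2 == p.2) : Int)) && p.1 == i)) : Int) := by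
  by_cases hc : k ≤ (prs.countP (fun r => r.2 == x) : Int)
  · rw [if_pos hc]
    congr 1
    refine List.countP_congr (fun a _ => ?_)
    by_cases h2 : a.2 = x
    · simp [h2, hc, Bool.and_comm]
    · simp [h2]
  · rw [if_neg hc]
    have : prs.countP (fun p => p.2 == x &&
        (decide (k ≤ (prs.countP (fun r => r.2 == p.2) : Int)) && p.1 == i)) = 0 := by
      refine List.countP_eq_zero.mpr (fun a _ => ?_)
      by_cases h2 : a.2 = x
      · simp [h2, hc]
      · simp [h2]
    rw [this]
    simp

-- ===== VERDICT (by name: the statement is the Claim_ definition above) =====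
theorem solution_spec : Claim_equal_solution := by
  unfold Claim_equal_solution
  intro id_list report k _ hpre
  unfold Spec_solution solution solution_alt
  refine List.map_congr_left (fun i _ => ?_)
  -- split A's triple-state initialisation into three independent folds
  rw [PySem.List.foldl_prod_mk
      (fun (d : PySem.Dict String (PySem.Set String)) e => d.insert e (PySem.Set.empty : PySem.Set String))
      (fun (s : PySem.Dict String (PySem.Set String) × PySem.Dict String Int) e =>
        (s.1.insert e (PySem.Set.empty : PySem.Set String), s.2.insert e (0 : Int)))
      id_list PySem.Dict.empty (PySem.Dict.empty, PySem.Dict.empty),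
    PySem.List.foldl_prod_mk
      (fun (d : PySem.Dict String (PySem.Set String)) e => d.insert e (PySem.Set.empty : PySem.Set String))
      (fun (d : PySem.Dict String Int) e => d.insert e (0 : Int))
      id_list PySem.Dict.empty PySem.Dict.empty]
  -- split A's second loop (pair state) into its two independent dict folds
  have hGsplit :
      (fun (st : PySem.Dict String (PySem.Set String) × PySem.Dict String (PySem.Set String)) ids =>
        match split2? ids with
        | some (rg, rd) =>
            (PySem.Dict.modify st.1 rg [] (fun s => PySem.Set.add s rd),
             PySem.Dict.modify st.2 rd [] (fun s => PySem.Set.add s rg))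
        | none => st)
      = (fun st ids =>
          ((fun (d : PySem.Dict String (PySem.Set String)) ids =>
              match split2? ids with
              | some (rg, rd) => PySem.Dict.modify d rg [] (fun s => PySem.Set.add s rd)
              | none => d) st.1 ids,
           (fun (d : PySem.Dict String (PySem.Set String)) ids =>
              match split2? ids with
              | some (rg, rd) => PySem.Dict.modify d rd [] (fun s => PySem.Set.add s rg)
              | none => d) st.2 ids)) := by
    funext st ids
    cases hs : split2? ids with
    | none => simp only [hs]
    | some pr => obtain ⟨a, b⟩ := pr; simp only [hs]
  simp only [hGsplit]
  rw [PySem.List.foldl_prod_mk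
      (fun (d : PySem.Dict String (PySem.Set String)) ids =>
        match split2? ids with
        | some (rg, rd) => PySem.Dict.modify d rg [] (fun s => PySem.Set.add s rd)
        | none => d)
      (fun (d : PySem.Dict String (PySem.Set String)) ids =>
        match split2? ids with
        | some (rg, rd) => PySem.Dict.modify d rd [] (fun s => PySem.Set.add s rg)
        | none => d)
      report
      (id_list.foldl (fun d e => d.insert e (PySem.Set.empty : PySem.Set String)) PySem.Dict.empty)
      (id_list.foldl (fun d e => d.insert e (PySem.Set.empty : PySem.Set String)) PySem.Dict.empty)]
  -- names for the recurring structures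
  set prs := report.foldl (fun (p : PySem.Set (String × String)) line =>
      match split2? line with
      | some pr => PySem.Set.add p pr
      | none => p) PySem.Set.empty with hprs
  set d2f := report.foldl (fun (d : PySem.Dict String (PySem.Set String)) ids =>
      match split2? ids with
      | some (rg, rd) => PySem.Dict.modify d rd [] (fun s => PySem.Set.add s rg)
      | none => d)
      (id_list.foldl (fun d e => d.insert e (PySem.Set.empty : PySem.Set String)) PySem.Dict.empty)
      with hd2f
  -- tokens of a well-formed report line are both ids
  have hpreS : ∀ line ∈ report, ∀ pr, split2? line = some pr →
      pr.1 ∈ id_list ∧ pr.2 ∈ id_list := by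
    intro line hl pr hs
    obtain ⟨-, hmem⟩ := hpre line hl
    have heq := split2?_eq line pr hs
    have h1 : pr.1 ∈ PySem.Str.split₀ line := by rw [heq]; simp
    have h2 : pr.2 ∈ PySem.Str.split₀ line := by rw [heq]; simp
    exact ⟨hmem _ h1, hmem _ h2⟩
  -- A's reported→reporters sets, read off B's pair set
  have hinv : ∀ x, d2f.getD x [] = (prs.filter (fun p => p.2 == x)).map (·.1) := by
    intro x
    rw [hd2f, hprs]
    refine d2_pairs_inv report _ PySem.Set.empty (fun y => ?_) x
    rw [getD_foldl_insert_empty id_list _ (fun z => PySem.Dict.getD_empty ..) y]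
    simp [PySem.Set.empty]
  -- keys of A's target dict = the distinct ids, in order
  have hK0 : (id_list.foldl (fun d e =>
      d.insert e (PySem.Set.empty : PySem.Set String)) PySem.Dict.empty).keys
      = PySem.Set.ofList id_list := by
    rw [PySem.Dict.keys_foldl_insert, PySem.Dict.keys_empty, PySem.Set.ofList_eq_foldl]
    rfl
  have hKd2 : d2f.keys = PySem.Set.ofList id_list := by
    rw [hd2f, keys_d2_loop _ _ (fun line hl pr hs => ?_), hK0]
    rw [hK0, PySem.Set.mem_ofList]
    exact (hpreS line hl pr hs).2
  have hnd : d2f.keys.Nodup := hKd2 ▸ PySem.Set.nodup_ofList id_list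
  -- evaluate A's final dict pointwise at i
  rw [getD_mail_loop, getD_foldl_insert_zero id_list _ (fun y => PySem.Dict.getD_empty ..) i,
    zero_add, PySem.Dict.items_eq_map_keys d2f hnd ([] : PySem.Set String), hKd2, List.map_map]
  -- rewrite each of A's per-target contributions as a countP over the pair set
  have hmc : List.map ((fun it : String × PySem.Set String =>
        if k ≤ (it.2.length : Int) then (it.2.count i : Int) else 0) ∘ fun x => (x, d2f.getD x []))
        (PySem.Set.ofList id_list)
      = List.map (fun x => (prs.countP (fun p => p.2 == x &&
          (decide (k ≤ (prs.countP (fun r => r.2 == p.2) : Int)) && p.1 == i)) : Int))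
        (PySem.Set.ofList id_list) := by
    refine List.map_congr_left (fun x _ => ?_)
    simp only [Function.comp]
    rw [hinv x, List.length_map, ← List.countP_eq_length_filter,
      List.count_eq_countP, List.countP_map, List.countP_filter]
    exact if_count_eq prs k i x
  rw [hmc, sum_countP_partition _ _ _ (PySem.Set.nodup_ofList id_list)]
  -- identify with B's countP: the membership conjunct always holds, and
  -- 'bad.contains p.2' is exactly the distinct-reporter threshold on p.2
  have hfin : prs.countP (fun p =>
        (decide (k ≤ (prs.countP (fun r => r.2 == p.2) : Int)) && p.1 == i) &&
          decide (p.2 ∈ PySem.Set.ofList id_list))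
      = prs.countP (fun pr => pr.1 == i &&
          ((prs.map (·.2)).foldl (fun s t =>
              if k ≤ ((prs.map (·.2)).count t : Int) then PySem.Set.add s t else s)
            PySem.Set.empty).contains pr.2) := by
    refine List.countP_congr (fun p hp => ?_)
    have hmem : p.2 ∈ id_list := by
      rcases mem_pairs_loop report PySem.Set.empty p (hprs ▸ hp) with h0 | ⟨line, hl, hs⟩
      · cases h0
      · exact (hpreS line hl p hs).2
    have htc : (prs.map (·.2)).count p.2 = prs.countP (fun r => r.2 == p.2) := by
      rw [List.count_eq_countP, List.countP_map]
      rfl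
    have hbadmem := mem_foldl_add_if (fun t => k ≤ ((prs.map (·.2)).count t : Int))
      (prs.map (·.2)) PySem.Set.empty p.2
    have hbad : ((prs.map (·.2)).foldl (fun s t =>
          if k ≤ ((prs.map (·.2)).count t : Int) then PySem.Set.add s t else s)
          PySem.Set.empty).contains p.2
        = decide (k ≤ (prs.countP (fun r => r.2 == p.2) : Int)) := by
      by_cases hk2 : k ≤ (prs.countP (fun r => r.2 == p.2) : Int)
      · have hm := hbadmem.mpr (Or.inr ⟨List.mem_map.mpr ⟨p, hp, rfl⟩, by rw [htc]; exact hk2⟩)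
        simp [List.contains_iff_mem, hk2]
        exact hm
      · have hm : ¬ p.2 ∈ (prs.map (·.2)).foldl (fun s t =>
            if k ≤ ((prs.map (·.2)).count t : Int) then PySem.Set.add s t else s)
            PySem.Set.empty := by
          intro hc
          rcases hbadmem.mp hc with h0 | ⟨_, h2⟩
          · simp [PySem.Set.empty] at h0
          · rw [htc] at h2; exact hk2 h2
        simp [List.contains_iff_mem, hk2]
        exact hm
    rw [hbad]
    simp [PySem.Set.mem_ofList, hmem, Bool.and_comm]
  exact congrArg _ hfin
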